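-- pv_equiv track=rewrite | github.com/weilianlow/leetcode | hackerrank/string/test_merge_the_tools.py | merge_the_tools
-- ===== SOURCE A (Python) =====
-- def merge_the_tools(string, k):
--     # your code goes here
--     s = set()
--     tmp = ''
--     result = list()
--     for i in range(len(string)):
--         if i % k == 0 and i > 0:
--             result.append(tmp)
--             s = set()
--             tmp = ''
--         if string[i] not in s:
--             tmp = tmp + string[i]
--             s.add(string[i])
--     result.append(tmp)
--     return '\n'.join(result)
-- ===== SOURCE B (Python) =====
-- def merge_the_tools(string, k):
--     chunks = []
--     rest = string
--     while rest:
--         chunks.append(rest[:k])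
--         rest = rest[k:]
--     return '\n'.join(''.join(dict.fromkeys(c)) for c in chunks)
-- ===== Notes on version B (the rewrite author's own statement) =====
-- stated objective: idiomatic
-- what changed: A's single flat per-character index loop with modulo boundary detection, quadratic-ish string concatenation and a manual set/buffer reset is replaced by slicing the string into k-chunks with a while loop and deduplicating each chunk with dict.fromkeys (C-level slicing and dedup instead of per-character interpreter work). Pre_ restricts to k >= 1, the natural chunk-size domain: for k = 0 A raises ZeroDivisionError on nonempty strings, and for k < 0 A's chunking by |k| is an accident of i % k with a negative divisor while B's slicing loop does not terminate.
-- outside the precondition, e.g. on merge_the_tools('abab', -2): A returns 'ab\nab', B does not finish within the time limit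
import Mathlib
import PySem

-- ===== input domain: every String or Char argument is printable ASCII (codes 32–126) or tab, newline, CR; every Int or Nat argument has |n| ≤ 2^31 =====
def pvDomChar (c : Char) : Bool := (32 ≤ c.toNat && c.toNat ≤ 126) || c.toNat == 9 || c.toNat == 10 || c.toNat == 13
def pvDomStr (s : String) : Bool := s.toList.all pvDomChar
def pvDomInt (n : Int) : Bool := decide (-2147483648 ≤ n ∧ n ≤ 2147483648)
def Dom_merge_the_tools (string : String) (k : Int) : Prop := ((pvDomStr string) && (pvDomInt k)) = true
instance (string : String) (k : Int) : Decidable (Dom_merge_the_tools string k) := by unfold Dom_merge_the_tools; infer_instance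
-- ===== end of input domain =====

-- B replaces A's flat index loop with modulo boundary detection by a slicing while-loop over k-chunks,
-- each deduplicated with dict.fromkeys (idiomatic decomposition; same asymptotic cost).

-- ===== PORT A =====
-- one iteration of A's for-loop body over the state (s, tmp, result) at an enumerated character (i, string[i])
def pvStepA (k : Int) (st : PySem.Set Char × List Char × List (List Char)) (ic : Int × Char) :
    PySem.Set Char × List Char × List (List Char) :=
  let st1 := if PySem.Int.mod ic.1 k = 0 ∧ 0 < ic.1
             then ((PySem.Set.empty : PySem.Set Char), ([] : List Char), st.2.2 ++ [st.2.1])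
             else st
  if PySem.Set.contains st1.1 ic.2 = false
  then (PySem.Set.add st1.1 ic.2, st1.2.1 ++ [ic.2], st1.2.2)
  else st1

-- the final 'result.append(tmp); return "\n".join(result)'
def pvFinish (st : PySem.Set Char × List Char × List (List Char)) : String :=
  PySem.Str.join "\n" ((st.2.2 ++ [st.2.1]).map String.ofList)

def merge_the_tools (string : String) (k : Int) : String :=
  pvFinish ((PySem.List.enumerate string.toList 0).foldl (pvStepA k)
    ((PySem.Set.empty : PySem.Set Char), ([] : List Char), ([] : List (List Char))))

-- ===== PORT B =====
-- Source B's 'while rest: chunks.append(rest[:k]); rest = rest[k:]'; on nonempty rest = c :: t,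
-- rest[:k] = c :: t.take (k.toNat - 1) and rest[k:] = t.drop (k.toNat - 1), exact for k ≥ 1 (Pre_;
-- for k ≤ 0 the Python loop does not terminate on nonempty input, which Pre_ excludes)
def pvChunks (k : Int) : List Char → List (List Char)
  | [] => []
  | c :: t => (c :: t.take (k.toNat - 1)) :: pvChunks k (t.drop (k.toNat - 1))
termination_by l => l.length
decreasing_by simp

def merge_the_tools_alt (string : String) (k : Int) : String :=
  PySem.Str.join "\n"
    ((pvChunks k string.toList).map (fun ch => String.ofList (PySem.List.dedup ch)))

-- ===== PRECONDITION & SPEC =====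
-- Pre_ restricts to k ≥ 1, the natural chunk-size domain: for k = 0 A raises ZeroDivisionError on
-- nonempty strings, and for k < 0 A's chunking by |k| is an accident of i % k with a negative divisor,
-- while B's slicing loop does not terminate there.
def Pre_merge_the_tools (string : String) (k : Int) : Prop := 1 ≤ k
instance (string : String) (k : Int) : Decidable (Pre_merge_the_tools string k) := by unfold Pre_merge_the_tools; infer_instance
def pvWitness_merge_the_tools : String × Int := ("abcabcd", 3)

def Spec_merge_the_tools (string : String) (k : Int) (out : String) : Prop := out = merge_the_tools_alt string k
instance (string : String) (k : Int) (out : String) : Decidable (Spec_merge_the_tools string k out) := by unfold Spec_merge_the_tools; infer_instance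

-- ===== CLAIM (what is proved, stated in full; the proofs are below) =====
def Claim_equal_merge_the_tools : Prop := ∀ (string : String) (k : Int), Dom_merge_the_tools string k → Pre_merge_the_tools string k → Spec_merge_the_tools string k (merge_the_tools string k)

-- ===== LEMMAS AND PROOFS =====

-- the final 'result.append(tmp)' of A: the list of finished chunks
def pvFin (st : PySem.Set Char × List Char × List (List Char)) : List (List Char) :=
  st.2.2 ++ [st.2.1]

lemma pv_enum_append (xs ys : List Char) (s : Int) :
    PySem.List.enumerate (xs ++ ys) s
      = PySem.List.enumerate xs s ++ PySem.List.enumerate ys (s + xs.length) := by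
  induction xs generalizing s with
  | nil => simp [PySem.List.enumerate_nil]
  | cons x t ih =>
      simp only [List.cons_append, PySem.List.enumerate_cons, ih, List.length_cons]
      have : s + 1 + (t.length : Int) = s + ((t.length : Int) + 1) := by ring
      simp [this]

-- A's per-character dedup step: on a state whose set component and buffer coincide
lemma pv_step_no_reset (k : Int) (s : PySem.Set Char) (res : List (List Char)) (b : Int) (c : Char)
    (h : ¬ (PySem.Int.mod b k = 0 ∧ 0 < b)) :
    pvStepA k (s, (s : List Char), res) (b, c) = (PySem.Set.add s c, (PySem.Set.add s c : List Char), res) := by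
  unfold pvStepA
  simp only [if_neg h]
  by_cases hc : c ∈ s
  · have hcontains : PySem.Set.contains s c = true := (PySem.Set.contains_iff s c).2 hc
    simp only [hcontains, Bool.true_eq_false, if_false]
    rw [PySem.Set.add_of_mem hc]
  · have hcontains : PySem.Set.contains s c = false := by
      cases hcon : PySem.Set.contains s c
      · rfl
      · exact absurd ((PySem.Set.contains_iff s c).1 hcon) hc
    simp only [hcontains, if_true]
    rw [PySem.Set.add_of_not_mem hc]

-- a stretch of A's loop that crosses no chunk boundary is exactly repeated set insertion
lemma pv_fold_no_reset (k : Int) (cl : List Char) (b : Int) (s : PySem.Set Char)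
    (res : List (List Char))
    (h : ∀ t : Nat, t < cl.length → ¬ (PySem.Int.mod (b + t) k = 0 ∧ 0 < b + t)) :
    (PySem.List.enumerate cl b).foldl (pvStepA k) (s, (s : List Char), res)
      = (PySem.Set.update s cl, (PySem.Set.update s cl : List Char), res) := by
  induction cl generalizing b s with
  | nil => simp [PySem.List.enumerate_nil, PySem.Set.update_nil]
  | cons c t ih =>
      rw [PySem.List.enumerate_cons, List.foldl_cons]
      have h0 : ¬ (PySem.Int.mod b k = 0 ∧ 0 < b) := by
        have := h 0 (by simp)
        simpa using this
      rw [pv_step_no_reset k s res b c h0]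
      rw [ih (b + 1) (PySem.Set.add s c) (fun t ht => by
        have := h (t + 1) (by simpa using Nat.succ_lt_succ ht)
        have harith : b + ((t : Int) + 1) = b + 1 + (t : Int) := by ring
        simpa [harith] using this)]
      rw [PySem.Set.update_cons]

lemma pv_dedup_cons (c : Char) (t : List Char) :
    PySem.List.dedup (c :: t) = PySem.Set.update (PySem.Set.add PySem.Set.empty c) t := by
  rw [PySem.List.dedup_eq_ofList, PySem.Set.ofList_eq_foldl, List.foldl_cons]
  rfl

-- main loop invariant: from the state just after the first character of a chunk starting at index b
-- (b ≥ 0, k ∣ b), A finishes exactly like B's chunk-by-chunk dedup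
lemma pv_fold_chunks (k : Int) (hk : 1 ≤ k) :
    ∀ n : Nat, ∀ rest : List Char, rest.length ≤ n →
    ∀ (b : Int) (c : Char) (res : List (List Char)), 0 ≤ b → k ∣ b →
    pvFin ((PySem.List.enumerate rest (b + 1)).foldl (pvStepA k)
        (PySem.Set.add PySem.Set.empty c, (PySem.Set.add PySem.Set.empty c : List Char), res))
      = res ++ (pvChunks k (c :: rest)).map PySem.List.dedup := by
  intro n
  induction n with
  | zero =>
      intro rest hlen b c res hb hdvd
      have hre : rest = [] := List.length_eq_zero_iff.1 (Nat.le_zero.1 hlen)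
      subst hre
      have hch : pvChunks k [c] = [[c]] := by simp [pvChunks]
      rw [hch]
      simp [PySem.List.enumerate_nil, pvFin, PySem.Set.empty, PySem.Set.add,
        PySem.Set.ofList_eq_self_of_nodup [c] (List.nodup_singleton c)]
  | succ n ih =>
      intro rest hlen b c res hb hdvd
      have hsplit : rest = rest.take (k.toNat - 1) ++ rest.drop (k.toNat - 1) :=
        (List.take_append_drop _ _).symm
      have ht1len : (rest.take (k.toNat - 1)).length ≤ k.toNat - 1 := by
        simp [List.length_take]
      have hnores : ∀ t : Nat, t < (rest.take (k.toNat - 1)).length →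
          ¬ (PySem.Int.mod (b + 1 + t) k = 0 ∧ 0 < b + 1 + t) := by
        intro t ht hcon
        have hdvd2 : k ∣ (b + 1 + t) := (PySem.Int.mod_eq_zero_iff_dvd _ _).1 hcon.1
        have hdvd3 : k ∣ (1 + (t : Int)) := by
          have harith : (1 : Int) + t = (b + 1 + t) - b := by ring
          rw [harith]; exact dvd_sub hdvd2 hdvd
        have hle : k ≤ 1 + (t : Int) := Int.le_of_dvd (by positivity) hdvd3
        have : t < k.toNat - 1 := lt_of_lt_of_le ht ht1len
        omega
      conv_lhs => rw [hsplit, pv_enum_append, List.foldl_append]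
      rw [pv_fold_no_reset k _ (b + 1) _ res hnores]
      rw [show PySem.Set.update (PySem.Set.add PySem.Set.empty c) (rest.take (k.toNat - 1))
            = PySem.List.dedup (c :: rest.take (k.toNat - 1))
          from (pv_dedup_cons c _).symm]
      cases ht2e : rest.drop (k.toNat - 1) with
      | nil =>
          have hch : pvChunks k (c :: rest) = [c :: rest.take (k.toNat - 1)] := by
            rw [pvChunks, ht2e]
            simp [pvChunks]
          rw [hch]
          simp [PySem.List.enumerate_nil, pvFin]
      | cons c2 t2' =>
          have hrestlong : k.toNat - 1 < rest.length := by
            by_contra hno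
            have hnil : rest.drop (k.toNat - 1) = [] := List.drop_eq_nil_of_le (by omega)
            rw [hnil] at ht2e; exact (List.cons_ne_nil _ _) ht2e.symm
          have ht1len' : (rest.take (k.toNat - 1)).length = k.toNat - 1 := by
            simp [List.length_take]; omega
          have hidx : b + 1 + ((rest.take (k.toNat - 1)).length : Int) = b + k := by
            rw [ht1len']; omega
          rw [hidx, PySem.List.enumerate_cons, List.foldl_cons]
          -- the boundary step: the reset fires and the finished chunk is appended to result
          have hboundary : pvStepA k
              (PySem.List.dedup (c :: rest.take (k.toNat - 1)),
               (PySem.List.dedup (c :: rest.take (k.toNat - 1)) : List Char), res) ((b + k), c2)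
              = (PySem.Set.add PySem.Set.empty c2, (PySem.Set.add PySem.Set.empty c2 : List Char),
                 res ++ [PySem.List.dedup (c :: rest.take (k.toNat - 1))]) := by
            unfold pvStepA
            have hmod : PySem.Int.mod (b + k) k = 0 := by
              rw [PySem.Int.mod_eq_zero_iff_dvd]
              exact dvd_add hdvd (dvd_refl k)
            have hpos : (0 : Int) < b + k := by omega
            simp [hmod, hpos, PySem.Set.empty, PySem.Set.add]
          rw [hboundary]
          have ht2'len : t2'.length ≤ n := by
            have h1 : rest.length = (rest.take (k.toNat - 1)).length + (rest.drop (k.toNat - 1)).length := by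
              conv_lhs => rw [hsplit]
              simp
              omega
            rw [ht2e] at h1
            simp only [List.length_cons] at h1
            omega
          rw [ih t2' ht2'len (b + k) c2 (res ++ [PySem.List.dedup (c :: rest.take (k.toNat - 1))])
              (by omega) (dvd_add hdvd (dvd_refl k))]
          have hchunks : pvChunks k (c :: rest)
              = (c :: rest.take (k.toNat - 1)) :: pvChunks k (c2 :: t2') := by
            rw [pvChunks, ht2e]
          rw [hchunks]
          simp

-- the first chunk: at index 0 the reset does not fire
lemma pv_top (k : Int) (hk : 1 ≤ k) (c : Char) (rest : List Char) :
    pvFin ((PySem.List.enumerate (c :: rest) 0).foldl (pvStepA k)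
        ((PySem.Set.empty : PySem.Set Char), ([] : List Char), ([] : List (List Char))))
      = (pvChunks k (c :: rest)).map PySem.List.dedup := by
  rw [PySem.List.enumerate_cons, List.foldl_cons]
  have hfirst : pvStepA k ((PySem.Set.empty : PySem.Set Char), ([] : List Char), ([] : List (List Char))) (0, c)
      = (PySem.Set.add PySem.Set.empty c, (PySem.Set.add PySem.Set.empty c : List Char), []) := by
    unfold pvStepA
    simp [PySem.Set.empty, PySem.Set.add]
  rw [hfirst]
  have := pv_fold_chunks k hk rest.length rest le_rfl 0 c [] le_rfl (dvd_zero k)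
  simpa using this

-- ===== VERDICT (by name: the statement is the Claim_ definition above) =====
theorem merge_the_tools_spec : Claim_equal_merge_the_tools := by
  intro string k _ hk
  unfold Spec_merge_the_tools merge_the_tools merge_the_tools_alt pvFinish
  cases h : string.toList with
  | nil =>
      rw [PySem.List.enumerate_nil]
      have hch : pvChunks k [] = [] := by simp [pvChunks]
      rw [hch]
      simp only [List.foldl_nil, List.map_nil]
      decide
  | cons c t =>
      have htop := pv_top k hk c t
      unfold pvFin at htop
      rw [htop]
      simp [List.map_map, Function.comp_def, PySem.List.dedup_eq_ofList]
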